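-- pv_equiv track=rewrite | github.com/ppalantir/axjingWorks | algorithm_note/tencent3exp1.py | Solve
-- ===== SOURCE A (Python) =====
-- def Solve(li1, li2):
--     max_1 = max(li1)
--     li1.remove(max_1)
--     li = []
--     for i in range(len(li1)):
--         for j in range(len(li2)):
--             li.append(li1[i] *li2[j])
--     return max(li)
-- ===== SOURCE B (Python) =====
-- def Solve(li1, li2):
--     max_1 = max(li1)
--     li1.remove(max_1)          # same in-place mutation of li1 as A
--     lo1, hi1 = min(li1), max(li1)
--     lo2, hi2 = min(li2), max(li2)
--     return max(lo1 * lo2, lo1 * hi2, hi1 * lo2, hi1 * hi2)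
-- ===== Notes on version B (the rewrite author's own statement) =====
-- stated objective: faster
-- what changed: Instead of materialising all len(li1)*len(li2) pairwise products and taking their max, B takes min/max of each list after the removal and returns the max of the four endpoint products.
import Mathlib
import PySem

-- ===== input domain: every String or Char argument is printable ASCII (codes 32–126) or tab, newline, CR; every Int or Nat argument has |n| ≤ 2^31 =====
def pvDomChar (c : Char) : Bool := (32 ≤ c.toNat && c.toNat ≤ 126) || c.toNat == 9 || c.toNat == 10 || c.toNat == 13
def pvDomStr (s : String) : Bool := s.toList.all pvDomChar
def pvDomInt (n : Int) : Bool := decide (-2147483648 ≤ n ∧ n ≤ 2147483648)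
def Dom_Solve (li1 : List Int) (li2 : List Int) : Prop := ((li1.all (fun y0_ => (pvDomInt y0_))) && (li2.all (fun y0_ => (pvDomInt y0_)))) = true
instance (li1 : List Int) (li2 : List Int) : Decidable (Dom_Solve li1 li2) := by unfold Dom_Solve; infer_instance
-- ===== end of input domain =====

-- B replaces A's O(n*m) materialisation of all pairwise products by the max of the four
-- endpoint products (min/max of each list), O(n+m).  Both Pythons mutate li1 in place
-- (li1.remove(max(li1))); the equivalence proved here is about the return value.

-- ===== PORT A =====
def Solve (li1 : List Int) (li2 : List Int) : Int :=
  match PySem.List.max? li1 (fun x => x) with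
  | none => 0   -- max([]) raises ValueError; excluded by Pre_Solve
  | some max_1 =>
    match PySem.List.remove? li1 max_1 with
    | none => 0 -- unreachable: max_1 ∈ li1
    | some li1' =>
      let li : List Int :=
        (PySem.List.pyRange 0 li1'.length 1).foldl (fun acc i =>
          (PySem.List.pyRange 0 li2.length 1).foldl (fun acc j =>
            acc ++ [PySem.List.pyGetD li1' i 0 * PySem.List.pyGetD li2 j 0]) acc) []
      match PySem.List.max? li (fun x => x) with
      | none => 0 -- max([]) raises ValueError; excluded by Pre_Solve
      | some r => r

-- ===== PORT B =====
def Solve_alt (li1 : List Int) (li2 : List Int) : Int :=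
  match PySem.List.max? li1 (fun x => x) with
  | none => 0   -- max([]) raises ValueError; excluded by Pre_Solve
  | some max_1 =>
    match PySem.List.remove? li1 max_1 with
    | none => 0 -- unreachable: max_1 ∈ li1
    | some li1' =>
      match PySem.List.min? li1' (fun x => x), PySem.List.max? li1' (fun x => x),
            PySem.List.min? li2 (fun x => x), PySem.List.max? li2 (fun x => x) with
      | some lo1, some hi1, some lo2, some hi2 =>
        max (max (max (lo1 * lo2) (lo1 * hi2)) (hi1 * lo2)) (hi1 * hi2)
      | _, _, _, _ => 0  -- min/max of [] raises ValueError; excluded by Pre_Solve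

-- ===== PRECONDITION & SPEC =====
-- Exactly where A returns: li1 needs ≥ 2 elements (one is removed, then max over the
-- remaining products) and li2 must be nonempty; otherwise max([]) raises ValueError.
def Pre_Solve (li1 : List Int) (li2 : List Int) : Prop := 2 ≤ li1.length ∧ li2 ≠ []
instance (li1 : List Int) (li2 : List Int) : Decidable (Pre_Solve li1 li2) := by unfold Pre_Solve; infer_instance
def pvWitness_Solve : List Int × List Int := ([3, -1, 2], [5, -4])

def Spec_Solve (li1 : List Int) (li2 : List Int) (out : Int) : Prop := out = Solve_alt li1 li2
instance (li1 : List Int) (li2 : List Int) (out : Int) : Decidable (Spec_Solve li1 li2 out) := by unfold Spec_Solve; infer_instance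

-- ===== CLAIM (what is proved, stated in full; the proofs are below) =====
def Claim_equal_Solve : Prop := ∀ (li1 : List Int) (li2 : List Int), Dom_Solve li1 li2 → Pre_Solve li1 li2 → Spec_Solve li1 li2 (Solve li1 li2)

-- ===== LEMMAS AND PROOFS =====

-- x*y is bounded by the two endpoint products.
lemma mul_le_max_endpoints (x lo hi y : Int) (h1 : lo ≤ y) (h2 : y ≤ hi) :
    x * y ≤ max (x * lo) (x * hi) := by
  rcases le_or_gt 0 x with hx | hx
  · exact le_max_of_le_right (by nlinarith)
  · exact le_max_of_le_left (by nlinarith)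

-- A's nested index loops build exactly the flatMap of all products.
lemma build_products (l1 l2 : List Int) :
    (PySem.List.pyRange 0 l1.length 1).foldl (fun acc i =>
      (PySem.List.pyRange 0 l2.length 1).foldl (fun acc j =>
        acc ++ [PySem.List.pyGetD l1 i 0 * PySem.List.pyGetD l2 j 0]) acc) []
    = l1.flatMap (fun x => l2.map (fun y => x * y)) := by
  have hinner : ∀ (x : Int) (acc : List Int),
      (PySem.List.pyRange 0 l2.length 1).foldl (fun acc j =>
        acc ++ [x * PySem.List.pyGetD l2 j 0]) acc = acc ++ l2.map (fun y => x * y) := by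
    intro x acc
    rw [PySem.List.foldl_pyRange_zero_pyGetD' l2 0 (fun acc y => acc ++ [x * y]) acc]
    exact PySem.List.foldl_append_singleton_eq_map (fun y => x * y) l2 acc
  calc (PySem.List.pyRange 0 l1.length 1).foldl (fun acc i =>
          (PySem.List.pyRange 0 l2.length 1).foldl (fun acc j =>
            acc ++ [PySem.List.pyGetD l1 i 0 * PySem.List.pyGetD l2 j 0]) acc) []
      = (PySem.List.pyRange 0 l1.length 1).foldl (fun acc i =>
          acc ++ l2.map (fun y => PySem.List.pyGetD l1 i 0 * y)) [] := by
        exact PySem.List.foldl_congr_mem _ _ _ _ (fun acc i _ => hinner (PySem.List.pyGetD l1 i 0) acc)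
    _ = l1.foldl (fun acc x => acc ++ l2.map (fun y => x * y)) [] := by
        exact PySem.List.foldl_pyRange_zero_pyGetD' l1 0
          (fun acc x => acc ++ l2.map (fun y => x * y)) []
    _ = l1.flatMap (fun x => l2.map (fun y => x * y)) := by
        rw [PySem.List.foldl_append_eq_flatMap, List.nil_append]

-- Core: the max of all pairwise products equals the max of the four endpoint products.
lemma max_flatMap_eq (l1 l2 : List Int) (lo1 hi1 lo2 hi2 M : Int)
    (hlo1 : PySem.List.min? l1 (fun x => x) = some lo1)
    (hhi1 : PySem.List.max? l1 (fun x => x) = some hi1)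
    (hlo2 : PySem.List.min? l2 (fun x => x) = some lo2)
    (hhi2 : PySem.List.max? l2 (fun x => x) = some hi2)
    (hM : PySem.List.max? (l1.flatMap (fun x => l2.map (fun y => x * y))) (fun x => x) = some M) :
    M = max (max (max (lo1 * lo2) (lo1 * hi2)) (hi1 * lo2)) (hi1 * hi2) := by
  have memP : ∀ x ∈ l1, ∀ y ∈ l2, x * y ∈ l1.flatMap (fun x => l2.map (fun y => x * y)) := by
    intro x hx y hy
    exact List.mem_flatMap.mpr ⟨x, hx, List.mem_map.mpr ⟨y, hy, rfl⟩⟩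
  have hMmem := PySem.List.max?_mem hM
  have hMmax := PySem.List.max?_isMax hM
  obtain ⟨x, hx, hxy⟩ := List.mem_flatMap.mp hMmem
  obtain ⟨y, hy, hprod⟩ := List.mem_map.mp hxy
  have hxlo : lo1 ≤ x := PySem.List.min?_isMin hlo1 x hx
  have hxhi : x ≤ hi1 := PySem.List.max?_isMax hhi1 x hx
  have hylo : lo2 ≤ y := PySem.List.min?_isMin hlo2 y hy
  have hyhi : y ≤ hi2 := PySem.List.max?_isMax hhi2 y hy
  apply le_antisymm
  · -- M = x*y ≤ the four-endpoint max
    subst hprod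
    have h1 : x * y ≤ max (x * lo2) (x * hi2) := mul_le_max_endpoints x lo2 hi2 y hylo hyhi
    have h2 : x * lo2 ≤ max (lo1 * lo2) (hi1 * lo2) := by
      have := mul_le_max_endpoints lo2 lo1 hi1 x hxlo hxhi
      calc x * lo2 = lo2 * x := by ring
        _ ≤ max (lo2 * lo1) (lo2 * hi1) := this
        _ = max (lo1 * lo2) (hi1 * lo2) := by rw [mul_comm lo2 lo1, mul_comm lo2 hi1]
    have h3 : x * hi2 ≤ max (lo1 * hi2) (hi1 * hi2) := by
      have := mul_le_max_endpoints hi2 lo1 hi1 x hxlo hxhi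
      calc x * hi2 = hi2 * x := by ring
        _ ≤ max (hi2 * lo1) (hi2 * hi1) := this
        _ = max (lo1 * hi2) (hi1 * hi2) := by rw [mul_comm hi2 lo1, mul_comm hi2 hi1]
    rcases le_max_iff.mp h1 with h | h
    · rcases le_max_iff.mp (h.trans h2) with h' | h'
      · exact le_max_of_le_left (le_max_of_le_left (le_max_of_le_left h'))
      · exact le_max_of_le_left (le_max_of_le_right h')
    · rcases le_max_iff.mp (h.trans h3) with h' | h'
      · exact le_max_of_le_left (le_max_of_le_left (le_max_of_le_right h'))
      · exact le_max_of_le_right h' 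
  · -- each endpoint product is a product, hence ≤ M
    have hl1lo := PySem.List.min?_mem hlo1
    have hl1hi := PySem.List.max?_mem hhi1
    have hl2lo := PySem.List.min?_mem hlo2
    have hl2hi := PySem.List.max?_mem hhi2
    have c1 := hMmax _ (memP lo1 hl1lo lo2 hl2lo)
    have c2 := hMmax _ (memP lo1 hl1lo hi2 hl2hi)
    have c3 := hMmax _ (memP hi1 hl1hi lo2 hl2lo)
    have c4 := hMmax _ (memP hi1 hl1hi hi2 hl2hi)
    simp only [max_le_iff]
    exact ⟨⟨⟨c1, c2⟩, c3⟩, c4⟩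

-- ===== VERDICT (by name: the statement is the Claim_ definition above) =====
theorem Solve_spec : Claim_equal_Solve := by
  intro li1 li2 _ hpre
  obtain ⟨hlen, hne2⟩ := hpre
  unfold Spec_Solve Solve Solve_alt
  -- li1 is nonempty, so max? returns some
  have hne1 : li1 ≠ [] := by intro h; simp [h] at hlen
  obtain ⟨m1, hm1⟩ : ∃ m, PySem.List.max? li1 (fun x => x) = some m := by
    cases h : PySem.List.max? li1 (fun x => x) with
    | none => exact absurd ((PySem.List.max?_eq_none_iff _ _).mp h) hne1
    | some m => exact ⟨m, rfl⟩
  have hm1mem := PySem.List.max?_mem hm1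
  have hrem : PySem.List.remove? li1 m1 = some (li1.erase m1) :=
    PySem.List.remove?_eq_some_erase li1 m1 hm1mem
  rw [hm1]; dsimp only; rw [hrem]; dsimp only
  set l1 := li1.erase m1 with hl1def
  have hl1ne : l1 ≠ [] := by
    have := List.length_erase_of_mem hm1mem
    intro h
    rw [hl1def] at h
    rw [h] at this
    simp at this
    omega
  -- all four min?/max? of l1, li2 are some
  obtain ⟨lo1, hlo1⟩ : ∃ m, PySem.List.min? l1 (fun x => x) = some m := by
    cases h : PySem.List.min? l1 (fun x => x) with
    | none => exact absurd ((PySem.List.min?_eq_none_iff _ _).mp h) hl1ne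
    | some m => exact ⟨m, rfl⟩
  obtain ⟨hi1, hhi1⟩ : ∃ m, PySem.List.max? l1 (fun x => x) = some m := by
    cases h : PySem.List.max? l1 (fun x => x) with
    | none => exact absurd ((PySem.List.max?_eq_none_iff _ _).mp h) hl1ne
    | some m => exact ⟨m, rfl⟩
  obtain ⟨lo2, hlo2⟩ : ∃ m, PySem.List.min? li2 (fun x => x) = some m := by
    cases h : PySem.List.min? li2 (fun x => x) with
    | none => exact absurd ((PySem.List.min?_eq_none_iff _ _).mp h) hne2
    | some m => exact ⟨m, rfl⟩
  obtain ⟨hi2, hhi2⟩ : ∃ m, PySem.List.max? li2 (fun x => x) = some m := by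
    cases h : PySem.List.max? li2 (fun x => x) with
    | none => exact absurd ((PySem.List.max?_eq_none_iff _ _).mp h) hne2
    | some m => exact ⟨m, rfl⟩
  rw [hlo1, hhi1, hlo2, hhi2]; dsimp only
  -- the built list is the flatMap of products, and it is nonempty
  rw [build_products l1 li2]
  have hPne : l1.flatMap (fun x => li2.map (fun y => x * y)) ≠ [] := by
    obtain ⟨a, ha⟩ := List.exists_mem_of_ne_nil l1 hl1ne
    obtain ⟨b, hb⟩ := List.exists_mem_of_ne_nil li2 hne2
    intro h
    have : a * b ∈ l1.flatMap (fun x => li2.map (fun y => x * y)) :=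
      List.mem_flatMap.mpr ⟨a, ha, List.mem_map.mpr ⟨b, hb, rfl⟩⟩
    simp [h] at this
  obtain ⟨M, hM⟩ : ∃ m, PySem.List.max? (l1.flatMap (fun x => li2.map (fun y => x * y))) (fun x => x) = some m := by
    cases h : PySem.List.max? (l1.flatMap (fun x => li2.map (fun y => x * y))) (fun x => x) with
    | none => exact absurd ((PySem.List.max?_eq_none_iff _ _).mp h) hPne
    | some m => exact ⟨m, rfl⟩
  rw [hM]; dsimp only
  exact max_flatMap_eq l1 li2 lo1 hi1 lo2 hi2 M hlo1 hhi1 hlo2 hhi2 hM
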